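-- pv_equiv track=rewrite | github.com/annzc/random-pycode-training | hurufBergantian.py | hurufBergantian
-- ===== SOURCE A (Python) =====
-- def hurufBergantian(string):
--     count = 0
--     char_stored = ''
--
--     for char in string:
--         if char == char_stored:
--             count += 1
--         elif char == 'P':
--             char_stored = char
--         elif char == 'C':
--             char_stored = char
--
--     return count
-- ===== SOURCE B (Python) =====
-- def hurufBergantian(string):
--     filtered = [c for c in string if c == 'P' or c == 'C']
--     return sum(1 for a, b in zip(filtered, filtered[1:]) if a == b)
-- ===== Notes on version B (the rewrite author's own statement) =====
-- stated objective: simpler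
-- what changed: Replaced A's running-marker state machine (count + char_stored mutated in one loop) by a filter of the P/C characters followed by a count of adjacent-equal pairs in that filtered list.
import Mathlib
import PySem

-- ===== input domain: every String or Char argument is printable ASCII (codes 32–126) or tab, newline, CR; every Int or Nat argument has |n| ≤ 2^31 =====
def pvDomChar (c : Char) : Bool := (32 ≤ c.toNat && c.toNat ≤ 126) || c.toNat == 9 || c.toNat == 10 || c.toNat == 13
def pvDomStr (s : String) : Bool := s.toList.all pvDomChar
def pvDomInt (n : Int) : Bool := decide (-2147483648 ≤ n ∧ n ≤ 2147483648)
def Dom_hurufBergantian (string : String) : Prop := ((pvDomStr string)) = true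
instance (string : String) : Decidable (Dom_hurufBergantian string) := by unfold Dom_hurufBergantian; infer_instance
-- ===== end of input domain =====

-- B replaces A's running-marker state machine by filtering the P/C characters and counting adjacent-equal pairs (simpler decomposition, same cost).


-- ===== PORT A =====
-- state = (count, char_stored); char_stored is '' / 'P' / 'C' in Python, modelled as
-- Option Char (none = '', exact: a 1-char string never equals '')
def hbStepA (st : Int × Option Char) (c : Char) : Int × Option Char :=
  if some c == st.2 then (st.1 + 1, st.2)
  else if c == 'P' then (st.1, some c)
  else if c == 'C' then (st.1, some c)
  else st

def hurufBergantian (string : String) : Int :=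
  (string.toList.foldl hbStepA ((0 : Int), (none : Option Char))).1

-- ===== PORT B =====
def hurufBergantian_alt (string : String) : Int :=
  let filtered := string.toList.filter (fun c => c == 'P' || c == 'C')
  (filtered.zip (filtered.drop 1)).foldl
    (fun acc p => if p.1 == p.2 then acc + 1 else acc) 0

-- ===== PRECONDITION & SPEC =====
def Spec_hurufBergantian (string : String) (out : Int) : Prop := out = hurufBergantian_alt string
instance (string : String) (out : Int) : Decidable (Spec_hurufBergantian string out) := by unfold Spec_hurufBergantian; infer_instance

-- ===== CLAIM (what is proved, stated in full; the proofs are below) =====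
def Claim_equal_hurufBergantian : Prop := ∀ (string : String), Dom_hurufBergantian string → Spec_hurufBergantian string (hurufBergantian string)

-- ===== LEMMAS AND PROOFS =====

-- number of adjacent equal pairs in a list
def hbPairs : List Char → Int
  | a :: b :: t => (if a == b then 1 else 0) + hbPairs (b :: t)
  | _ => 0

-- B's zip-fold computes hbPairs
lemma hbZipFold (l : List Char) :
    ∀ acc : Int,
      (l.zip (l.drop 1)).foldl (fun acc p => if p.1 == p.2 then acc + 1 else acc) acc
        = acc + hbPairs l := by
  induction l with
  | nil => intro acc; simp [hbPairs]
  | cons a t ih =>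
    intro acc
    cases t with
    | nil => simp [hbPairs]
    | cons b t' =>
      have h1 : ((a :: b :: t').zip ((a :: b :: t').drop 1))
          = (a, b) :: ((b :: t').zip ((b :: t').drop 1)) := by
        simp [List.zip]
      rw [h1, List.foldl_cons, ih]
      simp only [hbPairs]
      split <;> omega

def hbOptCons : Option Char → List Char → List Char
  | none, xs => xs
  | some s, xs => s :: xs

lemma hbMain : ∀ (l : List Char) (count : Int) (stored : Option Char),
    (stored = none ∨ stored = some 'P' ∨ stored = some 'C') →
    (l.foldl hbStepA (count, stored)).1
      = count + hbPairs (hbOptCons stored (l.filter (fun c => c == 'P' || c == 'C'))) := by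
  intro l
  induction l with
  | nil =>
    intro count stored hst
    rcases hst with h | h | h <;> subst h <;> simp [hbOptCons, hbPairs]
  | cons c t ih =>
    intro count stored hst
    rw [List.foldl_cons]
    by_cases heq : some c == stored
    · -- char == char_stored: stored = some c, c ∈ {P, C}
      have : stored = some c := by
        cases stored with
        | none => simp at heq
        | some s => simp at heq; simp [heq]
      subst this
      have hc : c = 'P' ∨ c = 'C' := by
        rcases hst with h | h | h <;> simp_all
      have hf : c == 'P' || c == 'C' := by rcases hc with h | h <;> simp [h]
      rw [show hbStepA (count, some c) c = (count + 1, some c) by simp [hbStepA]]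
      rw [ih (count + 1) (some c) (by rcases hc with h | h <;> simp [h])]
      simp [hbOptCons, List.filter, hf, hbPairs]
      omega
    · by_cases hP : c = 'P'
      · subst hP
        rw [show hbStepA (count, stored) 'P' = (count, some 'P') by
          simp [hbStepA, heq]]
        rw [ih count (some 'P') (by simp)]
        rcases hst with h | h | h <;> subst h <;>
          simp_all [hbOptCons, List.filter, hbPairs]
      · by_cases hC : c = 'C'
        · subst hC
          rw [show hbStepA (count, stored) 'C' = (count, some 'C') by
            simp [hbStepA, heq]]
          rw [ih count (some 'C') (by simp)]
          rcases hst with h | h | h <;> subst h <;>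
            simp_all [hbOptCons, List.filter, hbPairs]
        · rw [show hbStepA (count, stored) c = (count, stored) by
            simp [hbStepA, heq, hP, hC]]
          rw [ih count stored hst]
          have hf : (c == 'P' || c == 'C') = false := by simp [hP, hC]
          simp [List.filter, hf]

theorem hurufBergantian_spec : Claim_equal_hurufBergantian := by
  unfold Claim_equal_hurufBergantian
  intro s _
  unfold Spec_hurufBergantian hurufBergantian hurufBergantian_alt
  rw [hbMain s.toList 0 none (Or.inl rfl), hbZipFold]
  simp [hbOptCons]
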